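-- pv_equiv track=rewrite | github.com/Saurya2908/Recipe-and-Nutrition-RAG | utils/nutrition.py | violates_allergies
-- ===== SOURCE A (Python) =====
-- def _ingredient_list_to_lower(ings):
--     return [i.lower() for i in ings]
--
-- def violates_allergies(recipe, allergies):
--     ings = set(_ingredient_list_to_lower(recipe.get("ingredients", [])))
--     tags = set([t.lower() for t in recipe.get("tags", [])])
--     if "nuts" in allergies:
--         if "nuts" in [a.lower() for a in recipe.get("allergens", [])] or any(x in ings for x in ["peanut","almond","cashew","walnut","hazelnut"]):
--             return True
--     if "dairy" in allergies:
--         if "dairy" in [a.lower() for a in recipe.get("allergens", [])] or any(x in ings for x in ["milk","cheese","butter","yogurt","cream","paneer"]):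
--             return True
--     if "eggs" in allergies and "egg" in ings:
--         return True
--     if "shellfish" in allergies and any(x in ings for x in ["shrimp","prawn","crab","lobster"]):
--         return True
--     if "soy" in allergies and ("soy" in ings or "soy sauce" in ings or "tofu" in ings):
--         return True
--     if "fish" in allergies and any(x in ings for x in ["fish","salmon","tuna"]):
--         return True
--     return False
-- ===== SOURCE B (Python) =====
-- _KW_TO_ALLERGY = {
--     "peanut": "nuts", "almond": "nuts", "cashew": "nuts", "walnut": "nuts", "hazelnut": "nuts",
--     "milk": "dairy", "cheese": "dairy", "butter": "dairy", "yogurt": "dairy", "cream": "dairy", "paneer": "dairy",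
--     "egg": "eggs",
--     "shrimp": "shellfish", "prawn": "shellfish", "crab": "shellfish", "lobster": "shellfish",
--     "soy": "soy", "soy sauce": "soy", "tofu": "soy",
--     "fish": "fish", "salmon": "fish", "tuna": "fish",
-- }
--
-- def violates_allergies(recipe, allergies):
--     # Invert the direction: derive from the recipe the set of allergies it
--     # triggers, then test that set against the caller's allergy list.
--     triggered = {_KW_TO_ALLERGY[kw]
--                  for kw in (i.lower() for i in recipe.get("ingredients", []))
--                  if kw in _KW_TO_ALLERGY}
--     triggered.update(t for t in (a.lower() for a in recipe.get("allergens", []))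
--                      if t in ("nuts", "dairy"))
--     return not triggered.isdisjoint(allergies)
-- ===== Notes on version B (the rewrite author's own statement) =====
-- stated objective: alternative
-- what changed: Inverts the data flow: instead of testing each of six hard-coded allergy rules against the recipe, B maps each ingredient through a keyword->allergy dictionary (plus the nuts/dairy allergen tags) to build the set of allergies the recipe triggers, then returns whether that set intersects the given allergy list.
import Mathlib
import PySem

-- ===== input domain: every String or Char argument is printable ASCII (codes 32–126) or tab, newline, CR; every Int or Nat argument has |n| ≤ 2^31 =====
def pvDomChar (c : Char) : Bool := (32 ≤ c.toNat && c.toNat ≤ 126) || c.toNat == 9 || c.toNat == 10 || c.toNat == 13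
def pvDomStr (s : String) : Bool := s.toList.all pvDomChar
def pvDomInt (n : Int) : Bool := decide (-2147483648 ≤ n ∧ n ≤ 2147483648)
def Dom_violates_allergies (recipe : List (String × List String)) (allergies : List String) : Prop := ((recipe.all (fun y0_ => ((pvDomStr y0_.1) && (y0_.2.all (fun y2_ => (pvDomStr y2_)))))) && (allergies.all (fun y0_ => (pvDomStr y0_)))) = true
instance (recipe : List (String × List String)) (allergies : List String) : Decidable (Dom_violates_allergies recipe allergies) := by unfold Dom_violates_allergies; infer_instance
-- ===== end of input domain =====

-- B inverts the direction of A's check: it derives the set of allergies the recipe triggers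
-- (via a keyword->allergy map over the ingredients, plus the nuts/dairy allergen tags) and
-- tests that set against the allergy list; same results, alternative data-flow.

-- ===== PORT A =====
def ingredient_list_to_lower (ings : List String) : List String :=
  ings.map PySem.Str.lower

def violates_allergies (recipe : List (String × List String)) (allergies : List String) : Bool :=
  let ings : PySem.Set String :=
    PySem.Set.ofList (ingredient_list_to_lower ((PySem.Dict.mk recipe).getD "ingredients" []))
  let _tags : PySem.Set String :=
    PySem.Set.ofList (((PySem.Dict.mk recipe).getD "tags" []).map PySem.Str.lower)
  if allergies.contains "nuts" &&
      ((((PySem.Dict.mk recipe).getD "allergens" []).map PySem.Str.lower).contains "nuts" ||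
       (["peanut", "almond", "cashew", "walnut", "hazelnut"].any (fun x => PySem.Set.contains ings x))) then
    true
  else if allergies.contains "dairy" &&
      ((((PySem.Dict.mk recipe).getD "allergens" []).map PySem.Str.lower).contains "dairy" ||
       (["milk", "cheese", "butter", "yogurt", "cream", "paneer"].any (fun x => PySem.Set.contains ings x))) then
    true
  else if allergies.contains "eggs" && PySem.Set.contains ings "egg" then
    true
  else if allergies.contains "shellfish" &&
      (["shrimp", "prawn", "crab", "lobster"].any (fun x => PySem.Set.contains ings x)) then
    true
  else if allergies.contains "soy" &&
      (PySem.Set.contains ings "soy" || PySem.Set.contains ings "soy sauce" || PySem.Set.contains ings "tofu") then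
    true
  else if allergies.contains "fish" &&
      (["fish", "salmon", "tuna"].any (fun x => PySem.Set.contains ings x)) then
    true
  else
    false

-- ===== PORT B =====
def kwToAllergy : PySem.Dict String String :=
  PySem.Dict.mk
    [ ("peanut", "nuts"), ("almond", "nuts"), ("cashew", "nuts"), ("walnut", "nuts"), ("hazelnut", "nuts"),
      ("milk", "dairy"), ("cheese", "dairy"), ("butter", "dairy"), ("yogurt", "dairy"), ("cream", "dairy"), ("paneer", "dairy"),
      ("egg", "eggs"),
      ("shrimp", "shellfish"), ("prawn", "shellfish"), ("crab", "shellfish"), ("lobster", "shellfish"),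
      ("soy", "soy"), ("soy sauce", "soy"), ("tofu", "soy"),
      ("fish", "fish"), ("salmon", "fish"), ("tuna", "fish") ]

def violates_allergies_alt (recipe : List (String × List String)) (allergies : List String) : Bool :=
  let triggered : PySem.Set String :=
    PySem.Set.ofList
      ((((PySem.Dict.mk recipe).getD "ingredients" []).map PySem.Str.lower).filterMap
        (fun kw => kwToAllergy.get? kw))
  let triggered : PySem.Set String :=
    PySem.Set.update triggered
      ((((PySem.Dict.mk recipe).getD "allergens" []).map PySem.Str.lower).filter
        (fun t => t == "nuts" || t == "dairy"))
  !(PySem.Set.isdisjoint triggered allergies)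

-- ===== PRECONDITION & SPEC =====
def Spec_violates_allergies (recipe : List (String × List String)) (allergies : List String) (out : Bool) : Prop := out = violates_allergies_alt recipe allergies
instance (recipe : List (String × List String)) (allergies : List String) (out : Bool) : Decidable (Spec_violates_allergies recipe allergies out) := by unfold Spec_violates_allergies; infer_instance

-- ===== CLAIM (what is proved, stated in full; the proofs are below) =====
def Claim_equal_violates_allergies : Prop := ∀ (recipe : List (String × List String)) (allergies : List String), Dom_violates_allergies recipe allergies → Spec_violates_allergies recipe allergies (violates_allergies recipe allergies)

-- ===== LEMMAS AND PROOFS =====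

theorem kw_char (kw a : String) : kwToAllergy.get? kw = some a ↔ (kw, a) ∈
    [ ("peanut", "nuts"), ("almond", "nuts"), ("cashew", "nuts"), ("walnut", "nuts"), ("hazelnut", "nuts"),
      ("milk", "dairy"), ("cheese", "dairy"), ("butter", "dairy"), ("yogurt", "dairy"), ("cream", "dairy"), ("paneer", "dairy"),
      ("egg", "eggs"),
      ("shrimp", "shellfish"), ("prawn", "shellfish"), ("crab", "shellfish"), ("lobster", "shellfish"),
      ("soy", "soy"), ("soy sauce", "soy"), ("tofu", "soy"),
      ("fish", "fish"), ("salmon", "fish"), ("tuna", "fish") ] :=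
  PySem.Dict.get?_eq_some_iff_mem_items _ _ _ (by decide)

set_option maxHeartbeats 2000000 in
theorem core (ingsL alg allergies : List String) :
    (if allergies.contains "nuts" &&
        (alg.contains "nuts" ||
         (["peanut", "almond", "cashew", "walnut", "hazelnut"].any (fun x => PySem.Set.contains (PySem.Set.ofList ingsL) x))) then
      true
    else if allergies.contains "dairy" &&
        (alg.contains "dairy" ||
         (["milk", "cheese", "butter", "yogurt", "cream", "paneer"].any (fun x => PySem.Set.contains (PySem.Set.ofList ingsL) x))) then
      true
    else if allergies.contains "eggs" && PySem.Set.contains (PySem.Set.ofList ingsL) "egg" then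
      true
    else if allergies.contains "shellfish" &&
        (["shrimp", "prawn", "crab", "lobster"].any (fun x => PySem.Set.contains (PySem.Set.ofList ingsL) x)) then
      true
    else if allergies.contains "soy" &&
        (PySem.Set.contains (PySem.Set.ofList ingsL) "soy" || PySem.Set.contains (PySem.Set.ofList ingsL) "soy sauce" ||
         PySem.Set.contains (PySem.Set.ofList ingsL) "tofu") then
      true
    else if allergies.contains "fish" &&
        (["fish", "salmon", "tuna"].any (fun x => PySem.Set.contains (PySem.Set.ofList ingsL) x)) then
      true
    else
      false)
    = !(PySem.Set.isdisjoint
        (PySem.Set.update (PySem.Set.ofList (ingsL.filterMap (fun kw => kwToAllergy.get? kw)))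
          (alg.filter (fun t => t == "nuts" || t == "dairy")))
        allergies) := by
  rw [Bool.eq_iff_iff]
  simp [PySem.Set.isdisjoint, PySem.Set.mem_ofList, List.mem_filterMap,
    kw_char, List.mem_filter, Prod.mk.injEq]
  constructor
  · rintro (⟨hm, h | h | h | h | h | h⟩ | ⟨hm, h | h | h | h | h | h | h⟩ | ⟨hm, h⟩ |
      ⟨hm, h | h | h | h⟩ | ⟨hm, (h | h) | h⟩ | ⟨hm, h | h | h⟩) <;>
    · refine ⟨_, ?_, hm⟩
      first
      | exact Or.inr ⟨h, by simp⟩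
      | exact Or.inl ⟨_, h, by simp⟩
  · rintro ⟨x, ⟨a, ha, ⟨rfl, rfl⟩ | ⟨rfl, rfl⟩ | ⟨rfl, rfl⟩ | ⟨rfl, rfl⟩ | ⟨rfl, rfl⟩ |
      ⟨rfl, rfl⟩ | ⟨rfl, rfl⟩ | ⟨rfl, rfl⟩ | ⟨rfl, rfl⟩ | ⟨rfl, rfl⟩ | ⟨rfl, rfl⟩ |
      ⟨rfl, rfl⟩ | ⟨rfl, rfl⟩ | ⟨rfl, rfl⟩ | ⟨rfl, rfl⟩ | ⟨rfl, rfl⟩ | ⟨rfl, rfl⟩ |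
      ⟨rfl, rfl⟩ | ⟨rfl, rfl⟩ | ⟨rfl, rfl⟩ | ⟨rfl, rfl⟩ | ⟨rfl, rfl⟩⟩ |
      ⟨halg, rfl | rfl⟩, hall⟩
    · exact Or.inl ⟨hall, Or.inr (Or.inl ha)⟩
    · exact Or.inl ⟨hall, Or.inr (Or.inr (Or.inl ha))⟩
    · exact Or.inl ⟨hall, Or.inr (Or.inr (Or.inr (Or.inl ha)))⟩
    · exact Or.inl ⟨hall, Or.inr (Or.inr (Or.inr (Or.inr (Or.inl ha))))⟩
    · exact Or.inl ⟨hall, Or.inr (Or.inr (Or.inr (Or.inr (Or.inr ha))))⟩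
    · exact Or.inr (Or.inl ⟨hall, Or.inr (Or.inl ha)⟩)
    · exact Or.inr (Or.inl ⟨hall, Or.inr (Or.inr (Or.inl ha))⟩)
    · exact Or.inr (Or.inl ⟨hall, Or.inr (Or.inr (Or.inr (Or.inl ha)))⟩)
    · exact Or.inr (Or.inl ⟨hall, Or.inr (Or.inr (Or.inr (Or.inr (Or.inl ha))))⟩)
    · exact Or.inr (Or.inl ⟨hall, Or.inr (Or.inr (Or.inr (Or.inr (Or.inr (Or.inl ha)))))⟩)
    · exact Or.inr (Or.inl ⟨hall, Or.inr (Or.inr (Or.inr (Or.inr (Or.inr (Or.inr ha)))))⟩)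
    · exact Or.inr (Or.inr (Or.inl ⟨hall, ha⟩))
    · exact Or.inr (Or.inr (Or.inr (Or.inl ⟨hall, Or.inl ha⟩)))
    · exact Or.inr (Or.inr (Or.inr (Or.inl ⟨hall, Or.inr (Or.inl ha)⟩)))
    · exact Or.inr (Or.inr (Or.inr (Or.inl ⟨hall, Or.inr (Or.inr (Or.inl ha))⟩)))
    · exact Or.inr (Or.inr (Or.inr (Or.inl ⟨hall, Or.inr (Or.inr (Or.inr ha))⟩)))
    · exact Or.inr (Or.inr (Or.inr (Or.inr (Or.inl ⟨hall, Or.inl (Or.inl ha)⟩))))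
    · exact Or.inr (Or.inr (Or.inr (Or.inr (Or.inl ⟨hall, Or.inl (Or.inr ha)⟩))))
    · exact Or.inr (Or.inr (Or.inr (Or.inr (Or.inl ⟨hall, Or.inr ha⟩))))
    · exact Or.inr (Or.inr (Or.inr (Or.inr (Or.inr ⟨hall, Or.inl ha⟩))))
    · exact Or.inr (Or.inr (Or.inr (Or.inr (Or.inr ⟨hall, Or.inr (Or.inl ha)⟩))))
    · exact Or.inr (Or.inr (Or.inr (Or.inr (Or.inr ⟨hall, Or.inr (Or.inr ha)⟩))))
    · exact Or.inl ⟨hall, Or.inl halg⟩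
    · exact Or.inr (Or.inl ⟨hall, Or.inl halg⟩)

-- ===== VERDICT (by name: the statement is the Claim_ definition above) =====
theorem violates_allergies_spec : Claim_equal_violates_allergies := by
  intro recipe allergies _
  unfold Spec_violates_allergies violates_allergies violates_allergies_alt ingredient_list_to_lower
  exact core (((PySem.Dict.mk recipe).getD "ingredients" []).map PySem.Str.lower)
    (((PySem.Dict.mk recipe).getD "allergens" []).map PySem.Str.lower) allergies
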